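-- pv_equiv track=rewrite | github.com/Minorli/ob_comparator | db_comparator_v11_fixup.py | build_schema_mapping
-- ===== SOURCE A (Python) =====
-- from typing import Dict, Set, List, Tuple, Optional, NamedTuple
--
-- MasterCheckList = List[Tuple[str, str, str]]  # [(src_name, tgt_name, type)]
--
-- def build_schema_mapping(master_list: MasterCheckList) -> Dict[str, str]:
--     """
--     基于 master_list 中 TABLE 映射，推导 schema 映射：
--     - 如果同一 src_schema 只映射到唯一一个 tgt_schema，则使用该映射。
--     - 否则 (例如映射到多个 tgt_schema)，退回到 src_schema 本身 (1:1)。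
--     """
--     mapping_tmp: Dict[str, Set[str]] = {}
--     for src_name, tgt_name, obj_type in master_list:
--         if obj_type != 'TABLE':
--             continue
--         try:
--             src_schema, _ = src_name.split('.')
--             tgt_schema, _ = tgt_name.split('.')
--         except ValueError:
--             continue
--         mapping_tmp.setdefault(src_schema, set()).add(tgt_schema)
--
--     final_mapping: Dict[str, str] = {}
--     for src_schema, tgt_set in mapping_tmp.items():
--         if len(tgt_set) == 1:
--             final_mapping[src_schema] = next(iter(tgt_set))
--         else:
--             final_mapping[src_schema] = src_schema  # 无法确定，退回 1:1
--     return final_mapping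
-- ===== SOURCE B (Python) =====
-- def build_schema_mapping(master_list):
--     """Parse once into a flat list of (src_schema, tgt_schema) pairs, then for
--     each first-occurrence source compute its value by scanning its targets:
--     the first target if they all agree, else the source itself (1:1)."""
--     pairs = []
--     for src_name, tgt_name, obj_type in master_list:
--         if obj_type != 'TABLE':
--             continue
--         sp = src_name.split('.')
--         tp = tgt_name.split('.')
--         if len(sp) == 2 and len(tp) == 2:
--             pairs.append((sp[0], tp[0]))
--     srcs = []
--     for s, _ in pairs:
--         if s not in srcs:
--             srcs.append(s)
--     return {k: tgts[0] if all(t == tgts[0] for t in tgts) else k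
--             for k in srcs
--             for tgts in [[t for s, t in pairs if s == k]]}
-- ===== Notes on version B (the rewrite author's own statement) =====
-- stated objective: alternative
-- what changed: Instead of A's dict-of-target-sets built row by row and then re-scanned, B parses the rows once into a flat list of (src_schema, tgt_schema) pairs and derives each first-occurrence source's value by a direct scan of its targets (first target if all agree, else the source), with no dict or set accumulator.
import Mathlib
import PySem

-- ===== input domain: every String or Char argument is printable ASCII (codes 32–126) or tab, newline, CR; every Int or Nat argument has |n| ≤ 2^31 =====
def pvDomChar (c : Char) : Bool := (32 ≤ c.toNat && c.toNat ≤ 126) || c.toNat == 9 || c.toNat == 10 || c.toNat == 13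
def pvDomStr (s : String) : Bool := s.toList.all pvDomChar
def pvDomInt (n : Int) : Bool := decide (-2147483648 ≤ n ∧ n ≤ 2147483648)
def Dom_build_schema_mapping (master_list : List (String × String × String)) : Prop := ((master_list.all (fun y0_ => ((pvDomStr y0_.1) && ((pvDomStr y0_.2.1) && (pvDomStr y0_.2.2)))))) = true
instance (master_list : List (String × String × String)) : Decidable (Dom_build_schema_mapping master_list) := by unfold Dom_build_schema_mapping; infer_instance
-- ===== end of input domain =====

-- B replaces A's dict-of-target-sets plus second collapsing pass by a flat parsed pair list
-- scanned per first-occurrence source; same output, no dict/set accumulator (alternative decomposition).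

-- ===== PORT A =====
-- 'src_schema, _ = name.split "."' : some pair iff the split has exactly two parts, else ValueError (skipped)
def pvSplit2 (s : String) : Option (String × String) :=
  match PySem.Str.split? s "." with
  | some [a, b] => some (a, b)
  | _ => none

-- body of A's first loop: mapping_tmp.setdefault(src_schema, set()).add(tgt_schema)
def pvStepA (m : PySem.Dict String (PySem.Set String)) (row : String × String × String) :
    PySem.Dict String (PySem.Set String) :=
  if row.2.2 ≠ "TABLE" then m
  else
    match pvSplit2 row.1, pvSplit2 row.2.1 with
    | some (ss, _), some (ts, _) => m.modify ss PySem.Set.empty (fun s => PySem.Set.add s ts)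
    | _, _ => m

def build_schema_mapping (master_list : List (String × String × String)) : List (String × String) :=
  let tmp := master_list.foldl pvStepA PySem.Dict.empty
  -- second loop; next(iter(tgt_set)) on the len==1 set is its only element (head!), order-independent
  (tmp.items.foldl
    (fun fm p => fm.insert p.1 (if PySem.Set.len p.2 = 1 then p.2.head! else p.1))
    PySem.Dict.empty).items

-- ===== PORT B =====
-- one row parsed to its (src_schema, tgt_schema) pair: TABLE rows whose two names split into exactly two parts
def pvParse (row : String × String × String) : Option (String × String) :=
  if row.2.2 ≠ "TABLE" then none
  else
    match PySem.Str.split? row.1 ".", PySem.Str.split? row.2.1 "." with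
    | some [a, _], some [b, _] => some (a, b)
    | _, _ => none

def build_schema_mapping_alt (master_list : List (String × String × String)) : List (String × String) :=
  let pairs := master_list.filterMap pvParse
  let srcs := pairs.foldl (fun acc p => if p.1 ∈ acc then acc else acc ++ [p.1]) []
  -- tgts is nonempty for every k in srcs, so 'tgts[0]' (headD "") never sees the default
  srcs.map (fun k =>
    let tgts := (pairs.filter (fun p => p.1 == k)).map (·.2)
    (k, if tgts.all (fun t => t == tgts.headD "") then tgts.headD "" else k))

-- ===== PRECONDITION & SPEC =====
def Spec_build_schema_mapping (master_list : List (String × String × String)) (out : List (String × String)) : Prop := out = build_schema_mapping_alt master_list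
instance (master_list : List (String × String × String)) (out : List (String × String)) : Decidable (Spec_build_schema_mapping master_list out) := by unfold Spec_build_schema_mapping; infer_instance

-- ===== CLAIM (what is proved, stated in full; the proofs are below) =====
def Claim_equal_build_schema_mapping : Prop := ∀ (master_list : List (String × String × String)), Dom_build_schema_mapping master_list → Spec_build_schema_mapping master_list (build_schema_mapping master_list)

-- ===== LEMMAS AND PROOFS =====

-- the target list B scans for key k
def pvTgts (pairs : List (String × String)) (k : String) : List String :=
  (pairs.filter (fun p => p.1 == k)).map (·.2)

-- A's step written through B's row parser
lemma pvStepA_parse (m : PySem.Dict String (PySem.Set String)) (r : String × String × String) :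
    pvStepA m r = match pvParse r with
      | some (ss, ts) => m.modify ss PySem.Set.empty (fun s => PySem.Set.add s ts)
      | none => m := by
  unfold pvStepA pvParse pvSplit2
  by_cases h : r.2.2 ≠ "TABLE"
  · simp [h]
  · simp only [h, if_false]
    rcases h1 : PySem.Str.split? r.1 "." with _ | l1
    · simp
    · rcases h2 : PySem.Str.split? r.2.1 "." with _ | l2
      · match l1 with
        | [] => simp
        | [a] => simp
        | [a, b] => simp
        | a :: b :: c :: t => simp
      · match l1, l2 with
        | [], _ => simp
        | [a], _ => simp
        | a :: b :: c :: t, _ => simp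
        | [a, b], [] => simp
        | [a, b], [x] => simp
        | [a, b], [x, y] => simp
        | [a, b], x :: y :: z :: t => simp

-- invariant of A's first loop, phrased over the parsed pair list
def pvInv (ps : List (String × String)) (m : PySem.Dict String (PySem.Set String)) : Prop :=
  m.keys = PySem.Set.ofList (ps.map (·.1)) ∧
  ∀ k, m.getD k ([] : PySem.Set String) = PySem.Set.ofList (pvTgts ps k)

lemma pvInv_step (ps : List (String × String)) (m : PySem.Dict String (PySem.Set String))
    (r : String × String × String) (h : pvInv ps m) :
    pvInv (ps ++ (pvParse r).toList) (pvStepA m r) := by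
  obtain ⟨hk, hv⟩ := h
  rw [pvStepA_parse]
  rcases hp : pvParse r with _ | ⟨ss, ts⟩
  · simpa using ⟨hk, hv⟩
  · simp only [Option.toList_some]
    constructor
    · rw [PySem.Dict.keys_modify, List.map_append, List.map_cons, List.map_nil,
        PySem.Set.ofList_append_singleton, ← hk]
      by_cases hm : m.contains ss = true
      · rw [PySem.Dict.keys_insert_of_contains _ _ hm,
          PySem.Set.add_of_mem ((PySem.Dict.contains_iff_mem_keys _ _).mp hm)]
      · have hm' : m.contains ss = false := by simpa using hm
        rw [PySem.Dict.keys_insert_of_not_contains _ _ hm', PySem.Set.add_of_not_mem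
          (fun h => by rw [(PySem.Dict.contains_iff_mem_keys _ _).mpr h] at hm'; cases hm')]
    · intro k
      have hd : (PySem.Set.empty : PySem.Set String) = ([] : PySem.Set String) := rfl
      rw [hd, PySem.Dict.getD_modify]
      unfold pvTgts
      rw [List.filter_append, List.map_append]
      by_cases hks : k = ss
      · subst hks
        simp only [hv k]
        simp [PySem.Set.ofList_append_singleton, pvTgts]
      · rw [if_neg hks]
        have : List.filter (fun p => p.1 == k) [(ss, ts)] = [] := by
          simp [Ne.symm hks]
        rw [this]
        simpa using hv k

lemma pvInv_fold (l : List (String × String × String)) (ps : List (String × String))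
    (m : PySem.Dict String (PySem.Set String)) (h : pvInv ps m) :
    pvInv (ps ++ l.filterMap pvParse) (l.foldl pvStepA m) := by
  induction l generalizing ps m with
  | nil => simpa using h
  | cons r t ih =>
    have := ih (ps ++ (pvParse r).toList) (pvStepA m r) (pvInv_step ps m r h)
    rcases hp : pvParse r with _ | v <;>
      simpa [hp, List.filterMap_cons] using ih _ _ (pvInv_step ps m r h)

-- per-key collapse: set-size test on set(l) agrees with B's all-equal test, for nonempty l
lemma pvCollapse_eq (k : String) (l : List String) (hl : l ≠ []) :
    (if PySem.Set.len (PySem.Set.ofList l) = 1 then (PySem.Set.ofList l).head! else k)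
      = (if l.all (fun t => t == l.headD "") then l.headD "" else k) := by
  match l, hl with
  | x :: xs, _ =>
    rw [PySem.Set.ofList_cons]
    by_cases hall : ∀ y ∈ xs, y = x
    · have hdis : PySem.Set.discard (PySem.Set.ofList xs) x = [] := by
        rw [List.eq_nil_iff_forall_not_mem]
        intro y hy
        rw [PySem.Set.mem_discard] at hy
        exact hy.2 (hall y ((PySem.Set.mem_ofList _ _).mp hy.1))
      have hrhs : (x :: xs).all (fun t => t == (x :: xs).headD "") = true := by
        simp only [List.headD_cons, List.all_eq_true]
        intro y hy
        rcases List.mem_cons.mp hy with h | h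
        · simp [h]
        · simp [hall y h]
      rw [if_pos (by simp [hdis, PySem.Set.len]), if_pos hrhs]
      simp [hdis]
    · have hall2 : ∃ y ∈ xs, y ≠ x := by
        by_contra hno
        exact hall (fun y hy => by by_contra hne; exact hno ⟨y, hy, hne⟩)
      obtain ⟨y, hy, hyx⟩ := hall2
      have hmem : y ∈ PySem.Set.discard (PySem.Set.ofList xs) x :=
        (PySem.Set.mem_discard _ _ _).mpr ⟨(PySem.Set.mem_ofList _ _).mpr hy, hyx⟩
      have hne : PySem.Set.discard (PySem.Set.ofList xs) x ≠ [] := by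
        intro h; rw [h] at hmem; cases hmem
      have hlen : ¬ (PySem.Set.len (x :: PySem.Set.discard (PySem.Set.ofList xs) x) : Int) = 1 := by
        simp only [PySem.Set.len, List.length_cons]
        have : (PySem.Set.discard (PySem.Set.ofList xs) x).length ≠ 0 := by
          simpa [List.length_eq_zero_iff] using hne
        omega
      have hall' : ¬ (x :: xs).all (fun t => t == (x :: xs).headD "") = true := by
        simp only [List.headD_cons, List.all_eq_true]
        intro h
        exact hyx (by simpa using h y (List.mem_cons_of_mem x hy))
      rw [if_neg hlen, if_neg hall']

-- B's dedup loop from any start is a Set.update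
lemma pvFoldAdd (pairs : List (String × String)) (s : List String) :
    pairs.foldl (fun acc p => if p.1 ∈ acc then acc else acc ++ [p.1]) s
      = PySem.Set.update s (pairs.map (·.1)) := by
  induction pairs generalizing s with
  | nil => rw [List.map_nil, PySem.Set.update_nil, List.foldl_nil]
  | cons p t ih =>
    rw [List.foldl_cons, List.map_cons, PySem.Set.update_cons, ← ih,
      show PySem.Set.add s p.1 = (if p.1 ∈ s then s else s ++ [p.1]) from PySem.Set.add_eq_ite s p.1]

-- B's dedup loop is set(first components)
lemma pvSrcs_eq (pairs : List (String × String)) :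
    pairs.foldl (fun acc p => if p.1 ∈ acc then acc else acc ++ [p.1]) []
      = PySem.Set.ofList (pairs.map (·.1)) := by
  rw [pvFoldAdd, PySem.Set.update_nil_left]

lemma pvTgts_ne_nil (pairs : List (String × String)) (k : String)
    (hk : k ∈ pairs.map (·.1)) : pvTgts pairs k ≠ [] := by
  obtain ⟨p, hp, hpk⟩ := List.mem_map.mp hk
  unfold pvTgts
  intro h
  rw [List.map_eq_nil_iff, List.filter_eq_nil_iff] at h
  exact h p hp (by simp [hpk])

-- ===== VERDICT (by name: the statement is the Claim_ definition above) =====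
theorem build_schema_mapping_spec : Claim_equal_build_schema_mapping := by
  intro ml _
  unfold Spec_build_schema_mapping build_schema_mapping build_schema_mapping_alt
  have hinv := pvInv_fold ml [] PySem.Dict.empty
    ⟨rfl, fun _ => rfl⟩
  simp only [List.nil_append] at hinv
  obtain ⟨hk, hv⟩ := hinv
  set pairs := ml.filterMap pvParse with hpairs
  set tmp := ml.foldl pvStepA PySem.Dict.empty with htmp
  have hnd : tmp.keys.Nodup := hk ▸ PySem.Set.nodup_ofList _
  have hmapfst : tmp.items.map (·.1) = tmp.keys := rfl
  rw [PySem.Dict.items_foldl_insert_fresh tmp.items (·.1)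
      (fun p => if PySem.Set.len p.2 = 1 then p.2.head! else p.1) PySem.Dict.empty
      (fun a _ => PySem.Dict.contains_empty a.1) (hmapfst ▸ hnd)]
  rw [PySem.Dict.items_eq_map_keys tmp hnd ([] : PySem.Set String)]
  simp only [pvSrcs_eq, ← hk, List.map_map]
  refine List.map_congr_left (fun k hkm => ?_)
  have hkp : k ∈ pairs.map (·.1) := by
    rw [← PySem.Set.mem_ofList, ← hk]; exact hkm
  have hval := hv k
  simp only [Function.comp, hval]
  rw [Prod.mk.injEq]
  exact ⟨rfl, pvCollapse_eq k (pvTgts pairs k) (pvTgts_ne_nil pairs k hkp)⟩
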